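-- pv_equiv track=rewrite | github.com/PhNam24/Python-PTIT | BT/PY01039 - Kiem tra so dep.py | check
-- ===== SOURCE A (Python) =====
-- def check(s):
--     ss = set(list(s))
--     if len(ss) > 2:
--         return "NO"
--     for i in range(2, len(s)):
--         if abs(ord(s[i]) - ord(s[i - 1])) != abs(ord(s[1]) - ord(s[0])):
--             return "NO"
--     return "YES"
-- ===== SOURCE B (Python) =====
-- def check(s):
--     # at most 2 distinct chars AND the string is period-2 (shift-by-2 self-comparison)
--     if len(set(s)) > 2:
--         return "NO"
--     return "YES" if s[2:] == s[:-2] else "NO"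
-- ===== Notes on version B (the rewrite author's own statement) =====
-- stated objective: simpler
-- what changed: B replaces A's per-index Python loop verifying |ord(s[i])-ord(s[i-1])| == |ord(s[1])-ord(s[0])| by a single shift-by-2 self-comparison s[2:] == s[:-2] (period-2 check), equivalent under the at-most-2-distinct-characters guard.
import Mathlib
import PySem

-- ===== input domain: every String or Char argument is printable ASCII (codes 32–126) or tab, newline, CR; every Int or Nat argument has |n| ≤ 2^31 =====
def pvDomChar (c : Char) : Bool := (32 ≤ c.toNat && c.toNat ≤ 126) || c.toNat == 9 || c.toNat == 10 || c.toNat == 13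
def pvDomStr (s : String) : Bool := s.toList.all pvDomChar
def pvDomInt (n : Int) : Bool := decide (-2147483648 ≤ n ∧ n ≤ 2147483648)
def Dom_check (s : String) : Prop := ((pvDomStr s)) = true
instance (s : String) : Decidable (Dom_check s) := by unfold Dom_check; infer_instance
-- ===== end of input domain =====

-- B replaces A's per-index |ord(s[i])-ord(s[i-1])| verification loop by a shift-by-2
-- self-comparison s[2:] == s[:-2] (period-2 check), which is equivalent under the
-- at-most-2-distinct-chars guard; objective: simpler.

-- ===== PORT A =====
-- ord(c) as an Int
def pvOrd (c : Char) : Int := (c.toNat : Int)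

-- A's `for i in range(2, len(s))` loop with early return "NO".  Every index it reads
-- (i, i-1, and 0, 1 — the latter only when the range is nonempty, i.e. len ≥ 3) is in
-- range in Python, so `List.getD` with a dummy default is exact here.
def pvLoopA (cs : List Char) (d : Int) : List Int → String
  | [] => "YES"
  | i :: rest =>
    if |pvOrd (cs.getD i.toNat ' ') - pvOrd (cs.getD (i - 1).toNat ' ')| ≠ d then "NO"
    else pvLoopA cs d rest

def check (s : String) : String :=
  let cs := s.toList
  let ss := PySem.Set.ofList cs
  if ss.length > 2 then "NO"
  else pvLoopA cs (|pvOrd (cs.getD 1 ' ') - pvOrd (cs.getD 0 ' ')|)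
        (PySem.List.pyRange 2 (cs.length : Int) 1)

-- ===== PORT B =====
def check_alt (s : String) : String :=
  let cs := s.toList
  if (PySem.Set.ofList cs).length > 2 then "NO"
  else if PySem.List.slice cs (some 2) none = PySem.List.slice cs none (some (-2))
       then "YES" else "NO"

-- ===== PRECONDITION & SPEC =====
def Spec_check (s : String) (out : String) : Prop := out = check_alt s
instance (s : String) (out : String) : Decidable (Spec_check s out) := by unfold Spec_check; infer_instance

-- ===== CLAIM (what is proved, stated in full; the proofs are below) =====
def Claim_equal_check : Prop := ∀ (s : String), Dom_check s → Spec_check s (check s)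

-- ===== LEMMAS AND PROOFS =====

lemma pvOrd_inj {c c' : Char} (h : pvOrd c = pvOrd c') : c = c' := by
  apply Char.ext
  exact UInt32.toNat_inj.mp (by simpa [pvOrd] using h)

lemma pvGetD_mem {cs : List Char} {k : Nat} (h : k < cs.length) : cs.getD k ' ' ∈ cs := by
  rw [List.getD_eq_getElem cs ' ' h]; exact List.getElem_mem h

-- A's loop returns "YES" iff every visited index passes the test
lemma pvLoopA_eq (cs : List Char) (d : Int) (l : List Int) :
    pvLoopA cs d l =
      if ∀ i ∈ l, |pvOrd (cs.getD i.toNat ' ') - pvOrd (cs.getD (i - 1).toNat ' ')| = d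
      then "YES" else "NO" := by
  induction l with
  | nil => simp [pvLoopA]
  | cons i rest ih =>
    rw [pvLoopA, ih]
    by_cases h : |pvOrd (cs.getD i.toNat ' ') - pvOrd (cs.getD (i - 1).toNat ' ')| = d
    · rw [if_neg (by simpa using h)]
      by_cases hr : ∀ j ∈ rest, |pvOrd (cs.getD j.toNat ' ') - pvOrd (cs.getD (j - 1).toNat ' ')| = d
      · rw [if_pos hr, if_pos (fun j hj => by
          rcases List.mem_cons.mp hj with rfl | hj
          · exact h
          · exact hr j hj)]
      · rw [if_neg hr,
            if_neg (fun hall => hr (fun j hj => hall j (List.mem_cons_of_mem _ hj)))]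
    · rw [if_pos h, if_neg (fun hall => h (hall i (List.mem_cons_self)))]

-- at most 2 distinct characters and two distinct witnesses ⇒ every character is one of them
lemma pvTwoValues {cs : List Char} (h2 : (PySem.Set.ofList cs).length ≤ 2)
    {a b : Char} (ha : a ∈ cs) (hb : b ∈ cs) (hab : a ≠ b) :
    ∀ c ∈ cs, c = a ∨ c = b := by
  intro c hc
  by_contra hcon
  rw [not_or] at hcon
  have hnd : (PySem.Set.ofList cs).Nodup := PySem.Set.nodup_ofList cs
  have hsub : ({a, b, c} : Finset Char) ⊆ (PySem.Set.ofList cs).toFinset := by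
    intro x hx
    simp only [Finset.mem_insert, Finset.mem_singleton] at hx
    rw [List.mem_toFinset, PySem.Set.mem_ofList]
    rcases hx with rfl | rfl | rfl <;> assumption
  have hcard : ({a, b, c} : Finset Char).card = 3 := by
    rw [Finset.card_insert_of_notMem (by simp [hab, Ne.symm hcon.1]),
        Finset.card_insert_of_notMem (by simp [Ne.symm hcon.2]), Finset.card_singleton]
  have h3 : 3 ≤ (PySem.Set.ofList cs).toFinset.card := hcard ▸ Finset.card_le_card hsub
  rw [List.toFinset_card_of_nodup hnd] at h3
  omega

-- list equality s[2:] = s[:-2] (as drop/take) ⇔ pointwise period-2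
lemma pvShiftEqIff (cs : List Char) :
    cs.drop 2 = cs.take (cs.length - 2) ↔
      ∀ k, k + 2 < cs.length → cs.getD (k + 2) ' ' = cs.getD k ' ' := by
  constructor
  · intro h k hk
    have h1 : (cs.drop 2)[k]'(by simp; omega) = (cs.take (cs.length - 2))[k]'(by simp; omega) := by
      simp only [h]
    rw [List.getElem_drop, List.getElem_take] at h1
    rw [List.getD_eq_getElem cs ' ' hk, List.getD_eq_getElem cs ' ' (by omega)]
    simpa [Nat.add_comm] using h1
  · intro h
    apply List.ext_getElem (by simp)
    intro i h1 h2
    rw [List.getElem_drop, List.getElem_take]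
    have hi : i + 2 < cs.length := by simp at h1; omega
    have := h i hi
    rw [List.getD_eq_getElem cs ' ' hi, List.getD_eq_getElem cs ' ' (by omega)] at this
    simpa [Nat.add_comm] using this

-- the ∀-over-pyRange condition of A's loop, in Nat form
lemma pvRangeIff (cs : List Char) (d : Int) :
    (∀ i ∈ PySem.List.pyRange 2 (cs.length : Int) 1,
        |pvOrd (cs.getD i.toNat ' ') - pvOrd (cs.getD (i - 1).toNat ' ')| = d) ↔
      (∀ k, k + 2 < cs.length →
        |pvOrd (cs.getD (k + 2) ' ') - pvOrd (cs.getD (k + 1) ' ')| = d) := by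
  constructor
  · intro h k hk
    have hm : ((k : Int) + 2) ∈ PySem.List.pyRange 2 (cs.length : Int) 1 := by
      rw [PySem.List.mem_pyRange_one]; constructor <;> [omega; exact_mod_cast (by omega : (k:Int) + 2 < (cs.length : Int))]
    have := h ((k : Int) + 2) hm
    have e1 : ((k : Int) + 2).toNat = k + 2 := by omega
    have e2 : ((k : Int) + 2 - 1).toNat = k + 1 := by omega
    rwa [e1, e2] at this
  · intro h i hi
    rw [PySem.List.mem_pyRange_one] at hi
    have hk : (i.toNat - 2) + 2 < cs.length := by omega
    have := h (i.toNat - 2) hk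
    have e1 : i.toNat = (i.toNat - 2) + 2 := by omega
    have e2 : (i - 1).toNat = (i.toNat - 2) + 1 := by omega
    rwa [e1, e2]

-- the heart: under the ≤2-distinct-chars guard, A's constant-|diff| condition ⇔ period 2
lemma pvCoreIff (cs : List Char) (h2 : (PySem.Set.ofList cs).length ≤ 2) :
    (∀ k, k + 2 < cs.length →
        |pvOrd (cs.getD (k + 2) ' ') - pvOrd (cs.getD (k + 1) ' ')| =
          |pvOrd (cs.getD 1 ' ') - pvOrd (cs.getD 0 ' ')|) ↔
      (∀ k, k + 2 < cs.length → cs.getD (k + 2) ' ' = cs.getD k ' ') := by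
  constructor
  · intro hPA k hk
    by_cases hab : cs.getD 0 ' ' = cs.getD 1 ' '
    · -- constant-difference 0: all adjacent characters are equal
      have hd0 : |pvOrd (cs.getD 1 ' ') - pvOrd (cs.getD 0 ' ')| = 0 := by rw [hab]; simp
      have adj : ∀ j, j + 1 < cs.length → cs.getD (j + 1) ' ' = cs.getD j ' ' := by
        intro j hj
        rcases j with _ | m
        · exact hab.symm
        · have := hPA m (by omega)
          rw [hd0, abs_eq_zero, sub_eq_zero] at this
          exact pvOrd_inj this
      have e1 : cs.getD (k + 2) ' ' = cs.getD (k + 1) ' ' := adj (k + 1) (by omega)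
      rw [e1, adj k (by omega)]
    · -- two distinct values: adjacent characters always differ, so period 2 by pigeonhole
      have hmem := pvTwoValues h2 (pvGetD_mem (cs := cs) (by omega : 0 < cs.length))
        (pvGetD_mem (by omega : 1 < cs.length)) hab
      have hd0 : |pvOrd (cs.getD 1 ' ') - pvOrd (cs.getD 0 ' ')| ≠ 0 := by
        intro h
        rw [abs_eq_zero, sub_eq_zero] at h
        exact hab (pvOrd_inj h).symm
      have adjne : ∀ j, j + 1 < cs.length → cs.getD (j + 1) ' ' ≠ cs.getD j ' ' := by
        intro j hj
        rcases j with _ | m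
        · exact fun h => hab h.symm
        · intro h
          have := hPA m (by omega)
          rw [h] at this
          simp at this
          exact hd0 this.symm
      have hx := hmem _ (pvGetD_mem (by omega : k < cs.length))
      have hy := hmem _ (pvGetD_mem (by omega : k + 1 < cs.length))
      have hz := hmem _ (pvGetD_mem hk)
      have hxy : cs.getD (k + 1) ' ' ≠ cs.getD k ' ' := adjne k (by omega)
      have hyz : cs.getD (k + 2) ' ' ≠ cs.getD (k + 1) ' ' := adjne (k + 1) (by omega)
      rcases hx with hx | hx <;> rcases hy with hy | hy <;> rcases hz with hz | hz <;>
        first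
          | exact absurd (hy.trans hx.symm) hxy
          | exact absurd (hz.trans hy.symm) hyz
          | rw [hz, hx]
  · intro hPB k hk
    -- all adjacent |differences| equal the first one, by induction along the string
    have step : ∀ j, 1 ≤ j → j + 1 < cs.length →
        |pvOrd (cs.getD (j + 1) ' ') - pvOrd (cs.getD j ' ')| =
          |pvOrd (cs.getD 1 ' ') - pvOrd (cs.getD 0 ' ')| := by
      intro j
      induction j with
      | zero => omega
      | succ m ih =>
        intro _ hj
        rcases m with _ | m
        · rw [hPB 0 (by omega)]
          exact abs_sub_comm _ _
        · rw [hPB (m + 1) (by omega), abs_sub_comm]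
          exact ih (by omega) (by omega)
    exact step (k + 1) (by omega) (by omega)

-- B's shift-by-2 comparison, as drop/take
lemma pvSliceCond (cs : List Char) :
    (PySem.List.slice cs (some 2) none = PySem.List.slice cs none (some (-2))) ↔
      cs.drop 2 = cs.take (cs.length - 2) := by
  rw [PySem.List.slice_from cs (by norm_num : (0 : Int) ≤ 2),
      PySem.List.slice_to_neg_ofNat cs 2 (by norm_num)]
  exact Iff.rfl

-- ===== VERDICT (by name: the statement is the Claim_ definition above) =====
theorem check_spec : Claim_equal_check := by
  intro s _
  show check s = check_alt s
  simp only [check, check_alt]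
  by_cases hset : (PySem.Set.ofList s.toList).length > 2
  · rw [if_pos hset, if_pos hset]
  · rw [if_neg hset, if_neg hset, pvLoopA_eq]
    have hiff := (((pvRangeIff s.toList _).trans
      (pvCoreIff s.toList (by omega))).trans (pvShiftEqIff s.toList).symm).trans
      (pvSliceCond s.toList).symm
    exact if_congr hiff rfl rfl
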